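-- pv_equiv track=rewrite | github.com/matiaslindgren/pasta-analyzer | src/backend/indexer.py | LIS_by_one_starting_index
-- ===== SOURCE A (Python) =====
-- def LIS_by_one_starting_index(seq):
--     """
--     Return the index in a sorted seq at which the longest increasing subsequence, that increases by a difference of one, starts.
--     For example: seq = (1, 5, 6, 9, 10, 11, 12, 39, 40)
--     returns 3 because 9, 10, 12 starts at 3
--     """
--     assert seq
--     index = candidate_index = increasing_count = max_increasing_count = 0
--     increasing = True
--     for i in range(1, len(seq)):
--         if seq[i] - seq[i-1] == 1:
--             if not increasing:
--                 increasing = True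
--                 candidate_index = i-1
--             increasing_count += 1
--             if increasing_count > max_increasing_count:
--                 max_increasing_count = increasing_count
--                 index = candidate_index
--         elif increasing:
--             increasing_count = 0
--             increasing = False
--     return index
-- ===== SOURCE B (Python) =====
-- def LIS_by_one_starting_index(seq):
--     """
--     Return the index in a sorted seq at which the longest increasing subsequence, that increases by a difference of one, starts.
--     Two-phase re-implementation: build the list of running +1-run lengths, then
--     select the first position attaining the maximum (0 if there is no run).
--     """
--     counts = []
--     c = 0
--     for j in range(1, len(seq)):
--         c = c + 1 if seq[j] - seq[j - 1] == 1 else 0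
--         counts.append(c)
--     m = max(counts, default=0)
--     return counts.index(m) + 1 - m if m else 0
-- ===== Notes on version B (the rewrite author's own statement) =====
-- stated objective: simpler
-- what changed: A's one-pass state machine with an 'increasing' flag, candidate index and running record is replaced by a two-phase decomposition: build the list of running +1-run lengths, then select the result with max() and the first index of the maximum.
-- outside the precondition, e.g. on LIS_by_one_starting_index([]): A raises AssertionError, B returns 0
import Mathlib
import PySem

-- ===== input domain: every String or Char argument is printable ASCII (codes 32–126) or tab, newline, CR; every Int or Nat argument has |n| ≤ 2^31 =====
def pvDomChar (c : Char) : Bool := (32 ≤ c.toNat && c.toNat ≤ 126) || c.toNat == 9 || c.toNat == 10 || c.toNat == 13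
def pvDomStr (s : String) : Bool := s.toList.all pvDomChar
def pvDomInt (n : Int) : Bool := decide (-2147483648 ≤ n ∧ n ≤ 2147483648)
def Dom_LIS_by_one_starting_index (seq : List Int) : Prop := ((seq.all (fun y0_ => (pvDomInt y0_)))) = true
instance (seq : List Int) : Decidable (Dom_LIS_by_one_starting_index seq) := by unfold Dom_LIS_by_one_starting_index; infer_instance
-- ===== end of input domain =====

-- B replaces A's flag/candidate-index state machine by a two-phase decomposition (build the
-- list of running +1-run lengths, then select the first maximum); objective: simpler.

-- ===== PORT A =====
-- loop body of A's `for i in range(1, len(seq))`, state (index, candidate_index, increasing_count, max_increasing_count, increasing)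
def stepA (seq : List Int) (s : Int × Int × Int × Int × Bool) (i : Int) : Int × Int × Int × Int × Bool :=
  let idx := s.1; let cand := s.2.1; let cnt := s.2.2.1; let mx := s.2.2.2.1; let inc := s.2.2.2.2
  if PySem.List.pyGetD seq i 0 - PySem.List.pyGetD seq (i - 1) 0 = 1 then
    let cand := if inc = false then i - 1 else cand
    let inc := if inc = false then true else inc
    let cnt := cnt + 1
    if cnt > mx then (cand, cand, cnt, cnt, inc) else (idx, cand, cnt, mx, inc)
  else if inc = true then (idx, cand, 0, mx, false)
  else s

def LIS_by_one_starting_index (seq : List Int) : Int :=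
  ((PySem.List.pyRange 1 (PySem.List.len seq) 1).foldl (stepA seq) (0, 0, 0, 0, true)).1

-- ===== PORT B =====
-- loop body of B's `for j in range(1, len(seq))`, state (c, counts)
def stepB (seq : List Int) (s : Int × List Int) (j : Int) : Int × List Int :=
  let c := if PySem.List.pyGetD seq j 0 - PySem.List.pyGetD seq (j - 1) 0 = 1 then s.1 + 1 else 0
  (c, s.2 ++ [c])

def LIS_by_one_starting_index_alt (seq : List Int) : Int :=
  let counts := ((PySem.List.pyRange 1 (PySem.List.len seq) 1).foldl (stepB seq) (0, [])).2
  let m := PySem.List.maxD counts (fun x => x) 0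
  if m ≠ 0 then ((PySem.List.index? counts m).getD 0 : Int) + 1 - m else 0

-- ===== PRECONDITION & SPEC =====
-- Pre_ excludes only the empty sequence, on which A's `assert seq` raises AssertionError.
def Pre_LIS_by_one_starting_index (seq : List Int) : Prop := seq ≠ []
instance (seq : List Int) : Decidable (Pre_LIS_by_one_starting_index seq) := by unfold Pre_LIS_by_one_starting_index; infer_instance
def pvWitness_LIS_by_one_starting_index : List Int := [1, 2, 3]

def Spec_LIS_by_one_starting_index (seq : List Int) (out : Int) : Prop := out = LIS_by_one_starting_index_alt seq
instance (seq : List Int) (out : Int) : Decidable (Spec_LIS_by_one_starting_index seq out) := by unfold Spec_LIS_by_one_starting_index; infer_instance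

-- ===== CLAIM (what is proved, stated in full; the proofs are below) =====
def Claim_equal_LIS_by_one_starting_index : Prop := ∀ (seq : List Int), Dom_LIS_by_one_starting_index seq → Pre_LIS_by_one_starting_index seq → Spec_LIS_by_one_starting_index seq (LIS_by_one_starting_index seq)
-- ===== LEMMAS AND PROOFS =====

-- the pure selection A's record-tracking computes: start of the first maximal run (0 if none)
def selIdx (cs : List Int) (mx : Int) : Int :=
  if 0 < mx then ((PySem.List.index? cs mx).getD 0 : Int) + 1 - mx else 0

-- loop invariant tying A's five-component state (index, cand, cnt, mx, inc) to B's (c, counts)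
def StInv (k : Nat) (a : Int × Int × Int × Int × Bool) (b : Int × List Int) : Prop :=
  b.2.length = k ∧ a.2.2.1 = b.1 ∧ 0 ≤ b.1 ∧
  (a.2.2.2.2 = true ↔ (0 < b.1 ∨ k = 0)) ∧
  (a.2.2.2.2 = true → a.2.1 = (k : Int) - b.1) ∧
  0 ≤ a.2.2.2.1 ∧
  (PySem.List.max? b.2 (fun x => x) = if b.2.isEmpty then none else some a.2.2.2.1) ∧
  (∀ x ∈ b.2, x ≤ a.2.2.2.1) ∧
  (0 < a.2.2.2.1 → a.2.2.2.1 ∈ b.2) ∧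
  a.1 = selIdx b.2 a.2.2.2.1

lemma max?_append_singleton (cs : List Int) (v : Int) :
    PySem.List.max? (cs ++ [v]) (fun x => x) =
      match PySem.List.max? cs (fun x => x) with
      | none => some v
      | some m => if m < v then some v else some m := by
  rcases hM : PySem.List.max? cs (fun x => x) with _ | m <;>
    simp only [PySem.List.max?] at hM <;>
    simp [PySem.List.max?, List.foldl_append, hM]

lemma stinv_step (seq : List Int) (k : Nat) (a : Int × Int × Int × Int × Bool) (b : Int × List Int)
    (h : StInv k a b) : StInv (k + 1) (stepA seq a (1 + (k : Int))) (stepB seq b (1 + (k : Int))) := by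
  obtain ⟨idx, cand, cnt, mx, inc⟩ := a
  obtain ⟨c, cs⟩ := b
  obtain ⟨hlen, hcnt, hc0, hinc, hcand, hmx0, hmax, hub, hmem, hidx⟩ := h
  simp only at hlen hcnt hc0 hinc hcand hmx0 hmax hub hmem hidx
  obtain rfl : c = cnt := hcnt.symm
  by_cases hd : PySem.List.pyGetD seq (1 + (k : Int)) 0 - PySem.List.pyGetD seq (1 + (k : Int) - 1) 0 = 1
  · -- consecutive difference is 1
    have hB : stepB seq (c, cs) (1 + (k : Int)) = (c + 1, cs ++ [c + 1]) := by
      simp only [stepB]; rw [if_pos hd]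
    have hcand' : (if inc = false then 1 + (k : Int) - 1 else cand) = (k : Int) - c := by
      cases inc with
      | false =>
        have hcz : c = 0 := by
          have := (not_iff_not.mpr hinc).mp (by simp)
          omega
        rw [if_pos rfl, hcz]; ring
      | true => rw [if_neg (by simp)]; rw [hcand rfl]
    have hA : stepA seq (idx, cand, c, mx, inc) (1 + (k : Int)) =
        (if c + 1 > mx
          then ((k : Int) - c, (k : Int) - c, c + 1, c + 1, true)
          else (idx, (k : Int) - c, c + 1, mx, true)) := by
      simp only [stepA]
      rw [if_pos hd, hcand']
      cases inc <;> simp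
    rw [hA, hB]
    by_cases hrec : c + 1 > mx
    · -- new record
      rw [if_pos hrec]
      dsimp only [StInv]
      have hnotmem : (c + 1) ∉ cs := fun hmem' => by
        have := hub _ hmem'; omega
      refine ⟨by simp [hlen], rfl, by omega, ⟨fun _ => by omega, fun _ => rfl⟩, ?_, by omega,
        ?_, ?_, by simp, ?_⟩
      · intro _; push_cast; ring
      · rw [max?_append_singleton, hmax]
        cases hcs : cs.isEmpty with
        | true => simp
        | false => simp [show mx < c + 1 by omega]
      · intro x hx
        rcases List.mem_append.mp hx with hx | hx
        · have := hub _ hx; omega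
        · simp at hx; simp [hx]
      · rw [selIdx, if_pos (by omega), PySem.List.index?_append_singleton_self cs _ hnotmem]
        simp only [Option.getD_some, hlen]; omega
    · -- no new record: c + 1 ≤ mx, hence 0 < mx and mx ∈ cs
      rw [if_neg hrec]
      dsimp only [StInv]
      have hmxpos : 0 < mx := by omega
      have hmxmem : mx ∈ cs := hmem hmxpos
      have hcsne : cs.isEmpty = false := by
        cases cs with
        | nil => simp at hmxmem
        | cons y t => rfl
      refine ⟨by simp [hlen], rfl, by omega, ⟨fun _ => by omega, fun _ => rfl⟩, ?_, by omega,
        ?_, ?_, ?_, ?_⟩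
      · intro _; push_cast; ring
      · rw [max?_append_singleton, hmax]
        simp [hcsne]
        omega
      · intro x hx
        rcases List.mem_append.mp hx with hx | hx
        · exact hub _ hx
        · simp at hx; omega
      · intro _; exact List.mem_append.mpr (Or.inl hmxmem)
      · rw [hidx, selIdx, selIdx, if_pos hmxpos, if_pos hmxpos,
            PySem.List.index?_append_of_mem [c + 1] hmxmem]
  · -- difference is not 1
    have hB : stepB seq (c, cs) (1 + (k : Int)) = (0, cs ++ [0]) := by
      simp only [stepB]; rw [if_neg hd]
    have hmax' : PySem.List.max? (cs ++ [0]) (fun x => x) = some mx := by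
      rw [max?_append_singleton, hmax]
      cases hcs : cs.isEmpty with
      | true =>
        have hnil : cs = [] := by cases cs with | nil => rfl | cons y t => simp at hcs
        subst hnil
        have hmz : mx = 0 := by
          by_cases h0 : 0 < mx
          · exact absurd (hmem h0) (by simp)
          · omega
        simp [hmz]
      | false => simp; omega
    have hsel : selIdx (cs ++ [0]) mx = selIdx cs mx := by
      by_cases h0 : 0 < mx
      · rw [selIdx, selIdx, if_pos h0, if_pos h0, PySem.List.index?_append_of_mem [0] (hmem h0)]
      · rw [selIdx, selIdx, if_neg h0, if_neg h0]
    have hub' : ∀ x ∈ cs ++ [0], x ≤ mx := by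
      intro x hx
      rcases List.mem_append.mp hx with hx | hx
      · exact hub _ hx
      · simp at hx; omega
    have hcz : inc = false → c = 0 := by
      intro hF
      rw [hF] at hinc
      have := (not_iff_not.mpr hinc).mp (by simp)
      omega
    have hA : stepA seq (idx, cand, c, mx, inc) (1 + (k : Int)) = (idx, cand, 0, mx, false) := by
      simp only [stepA]
      rw [if_neg hd]
      cases inc with
      | true => simp
      | false => simp [hcz rfl]
    rw [hA, hB]
    dsimp only [StInv]
    exact ⟨by simp [hlen], rfl, le_refl 0, by simp, by simp, hmx0,
      hmax'.trans (by simp), hub', fun h0 => List.mem_append.mpr (Or.inl (hmem h0)),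
      hidx.trans hsel.symm⟩

lemma loop_inv (seq : List Int) (k : Nat) :
    StInv k ((PySem.List.pyRange 1 (1 + (k : Int)) 1).foldl (stepA seq) (0, 0, 0, 0, true))
          ((PySem.List.pyRange 1 (1 + (k : Int)) 1).foldl (stepB seq) (0, [])) := by
  induction k with
  | zero =>
    rw [show (1 + ((0 : Nat) : Int)) = 1 by norm_num, PySem.List.pyRange_one_eq_nil (le_refl 1)]
    simp [StInv, selIdx, PySem.List.max?]
  | succ k ih =>
    have hsplit : PySem.List.pyRange 1 (1 + ((k + 1 : Nat) : Int)) 1 =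
        PySem.List.pyRange 1 (1 + (k : Int)) 1 ++ [1 + (k : Int)] := by
      rw [show (1 + ((k + 1 : Nat) : Int)) = (1 + (k : Int)) + 1 by push_cast; ring,
          PySem.List.pyRange_one_succ_right (by omega)]
    rw [hsplit, List.foldl_append, List.foldl_append]
    simp only [List.foldl_cons, List.foldl_nil]
    exact stinv_step seq k _ _ ih

-- ===== VERDICT (by name: the statement is the Claim_ definition above) =====
theorem LIS_by_one_starting_index_spec : Claim_equal_LIS_by_one_starting_index := by
  intro seq _ hpre
  unfold Spec_LIS_by_one_starting_index
  obtain ⟨y, t, rfl⟩ : ∃ y t, seq = y :: t := by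
    cases seq with
    | nil => exact absurd rfl hpre
    | cons y t => exact ⟨y, t, rfl⟩
  have hlen : PySem.List.len (y :: t) = 1 + (t.length : Int) := by
    simp [PySem.List.len_eq]; ring
  have h := loop_inv (y :: t) t.length
  obtain ⟨hl, hcnt, hc0, hinc, hcand, hmx0, hmax, hub, hmem, hidx⟩ := h
  unfold LIS_by_one_starting_index LIS_by_one_starting_index_alt
  rw [hlen]
  set a := (PySem.List.pyRange 1 (1 + (t.length : Int)) 1).foldl (stepA (y :: t)) (0, 0, 0, 0, true) with ha
  set b := (PySem.List.pyRange 1 (1 + (t.length : Int)) 1).foldl (stepB (y :: t)) (0, []) with hb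
  have hm : PySem.List.maxD b.2 (fun x => x) 0 = a.2.2.2.1 := by
    rw [PySem.List.maxD, hmax]
    cases hcs : b.2.isEmpty with
    | true =>
      have hnil : b.2 = [] := by
        cases hx : b.2 with
        | nil => rfl
        | cons z zs => rw [hx] at hcs; simp at hcs
      have : a.2.2.2.1 = 0 := by
        by_cases h0 : 0 < a.2.2.2.1
        · exact absurd (hmem h0) (by rw [hnil]; simp)
        · omega
      simp [this]
    | false => simp
  dsimp only
  rw [hm, hidx]
  unfold selIdx
  by_cases h0 : 0 < a.2.2.2.1
  · rw [if_pos h0, if_pos (by omega : a.2.2.2.1 ≠ 0)]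
  · rw [if_neg h0, if_neg (by omega : ¬ a.2.2.2.1 ≠ 0)]
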